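-- pv_equiv track=rewrite | github.com/N8Brooks/aoc | python/year_2017/day_09.py | part_1
-- ===== SOURCE A (Python) =====
-- def part_1(text):
--     def garbage(i):
--         while (char := text[i]) != ">":
--             i += (char == "!") + 1
--         return i
--
--     depth = count = i = 0
--     length = len(text)
--
--     while i < length:
--         if (char := text[i]) == "<":
--             i = garbage(i + 1)
--         elif char == "{":
--             depth += 1
--             count += depth
--         elif char == "}":
--             depth -= 1
--         i += 1
--
--     return count
-- ===== SOURCE B (Python) =====
-- def part_1(text):
--     depth = count = 0
--     in_garbage = skip_next = False
--     for char in text: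
--         if skip_next:
--             skip_next = False
--         elif in_garbage:
--             if char == "!":
--                 skip_next = True
--             elif char == ">":
--                 in_garbage = False
--         elif char == "<":
--             in_garbage = True
--         elif char == "{":
--             depth += 1
--             count += depth
--         elif char == "}":
--             depth -= 1
--     return count
-- ===== Notes on version B (the rewrite author's own statement) =====
-- stated objective: simpler
-- what changed: Replaced the index-jumping while loop with its nested garbage() helper by a single flat for-loop over characters with two state flags (in_garbage, skip_next), removing per-character indexing/walrus and the inner function call; Pre_ excludes the inputs with unterminated garbage, where A raises IndexError while B returns normally.
import Mathlib
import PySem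

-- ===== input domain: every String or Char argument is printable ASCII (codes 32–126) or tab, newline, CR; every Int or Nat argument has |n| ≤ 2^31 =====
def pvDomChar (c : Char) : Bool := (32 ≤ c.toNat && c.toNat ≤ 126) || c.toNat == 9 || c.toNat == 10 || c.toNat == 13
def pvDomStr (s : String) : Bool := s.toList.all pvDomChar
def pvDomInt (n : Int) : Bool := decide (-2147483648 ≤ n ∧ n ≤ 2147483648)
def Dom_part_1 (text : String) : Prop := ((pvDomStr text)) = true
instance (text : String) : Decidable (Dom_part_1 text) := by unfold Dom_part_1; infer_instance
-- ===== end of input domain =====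

-- B replaces A's index-jumping while loop and nested garbage() helper by one flat
-- for-loop over the characters with two state flags (simpler decomposition; same O(n) cost).

-- ===== PORT A =====
-- Inner helper `garbage(i)`: indices are always ≥ 0 here, so Python's text[i] is exact as
-- List.get? (none = IndexError; Pre_part_1 excludes exactly those inputs).
def garbA (cs : List Char) (i : Nat) : Nat :=
  match h : cs[i]? with
  | none => i        -- Python raises IndexError here; excluded by Pre_part_1
  | some c => if c = '>' then i
              else garbA cs (i + (if c = '!' then 2 else 1))
termination_by cs.length - i
decreasing_by
  rename_i hne
  have hlt : i < cs.length := by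
    by_contra hc
    rw [List.getElem?_eq_none (by omega)] at h
    simp at h
  split <;> omega

theorem garbA_ge (cs : List Char) (i : Nat) : i ≤ garbA cs i := by
  have aux : ∀ n j, cs.length - j ≤ n → j ≤ garbA cs j := by
    intro n
    induction n with
    | zero =>
      intro j hb
      rw [garbA.eq_def]
      split
      · omega
      · rename_i c h
        have hlt : j < cs.length := (List.getElem?_eq_some_iff.mp h).1
        exact absurd hlt (by omega)
    | succ n ih =>
      intro j hb
      rw [garbA.eq_def]
      split
      · omega
      · rename_i c h
        have hlt : j < cs.length := (List.getElem?_eq_some_iff.mp h).1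
        split
        · omega
        · split
          · have := ih (j + 2) (by omega); omega
          · have := ih (j + 1) (by omega); omega
  exact aux cs.length i (by omega)

def loopA (cs : List Char) (i : Nat) (depth count : Int) : Int :=
  if h : i < cs.length then
    let c := cs[i]
    if c = '<' then loopA cs (garbA cs (i + 1) + 1) depth count
    else if c = '{' then loopA cs (i + 1) (depth + 1) (count + (depth + 1))
    else if c = '}' then loopA cs (i + 1) (depth - 1) count
    else loopA cs (i + 1) depth count
  else count
termination_by cs.length - i
decreasing_by
  · have := garbA_ge cs (i + 1); omega
  · omega
  · omega
  · omega

def part_1 (text : String) : Int := loopA text.toList 0 0 0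

-- ===== PORT B =====
-- state: (depth, count, in_garbage, skip_next)
def stepB (st : Int × Int × Bool × Bool) (ch : Char) : Int × Int × Bool × Bool :=
  let (d, cnt, g, s) := st
  if s then (d, cnt, g, false)
  else if g then
    if ch = '!' then (d, cnt, g, true)
    else if ch = '>' then (d, cnt, false, s)
    else (d, cnt, g, s)
  else if ch = '<' then (d, cnt, true, s)
  else if ch = '{' then (d + 1, cnt + (d + 1), g, s)
  else if ch = '}' then (d - 1, cnt, g, s)
  else (d, cnt, g, s)

def part_1_alt (text : String) : Int :=
  (text.toList.foldl stepB (0, 0, false, false)).2.1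

-- ===== PRECONDITION & SPEC =====
-- flag-only scan (in_garbage, skip_next) used to state well-formedness of the input
def gstep (st : Bool × Bool) (ch : Char) : Bool × Bool :=
  let (g, s) := st
  if s then (g, false)
  else if g then
    if ch = '!' then (g, true)
    else if ch = '>' then (false, false)
    else (g, s)
  else if ch = '<' then (true, false)
  else (g, s)

-- Pre_ excludes exactly the inputs with an unterminated garbage section (a scan that ends
-- still inside garbage), on which Python A raises IndexError.
def Pre_part_1 (text : String) : Prop :=
  text.toList.foldl gstep (false, false) = (false, false)
instance (text : String) : Decidable (Pre_part_1 text) := by unfold Pre_part_1; infer_instance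

def pvWitness_part_1 : String := "{{<a!!>},{}}"

def Spec_part_1 (text : String) (out : Int) : Prop := out = part_1_alt text
instance (text : String) (out : Int) : Decidable (Spec_part_1 text out) := by unfold Spec_part_1; infer_instance

-- ===== CLAIM (what is proved, stated in full; the proofs are below) =====
def Claim_equal_part_1 : Prop := ∀ (text : String), Dom_part_1 text → Pre_part_1 text → Spec_part_1 text (part_1 text)

-- ===== LEMMAS AND PROOFS =====

theorem drop_cons_of_lt (cs : List Char) (i : Nat) (h : i < cs.length) :
    cs.drop i = cs[i] :: cs.drop (i + 1) :=
  (List.drop_eq_getElem_cons h)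

-- garbage lemma: if the flag scan starting in garbage at position i ends out of garbage,
-- then garbA finds the terminating '>' and both scans agree past it
theorem garb_fold (n : ℕ) : ∀ (cs : List Char) (i : Nat) (d cnt : Int),
    cs.length - i ≤ n →
    ((cs.drop i).foldl gstep (true, false)).1 = false →
    (cs.drop i).foldl gstep (true, false)
        = (cs.drop (garbA cs i + 1)).foldl gstep (false, false)
    ∧ (cs.drop i).foldl stepB (d, cnt, true, false)
        = (cs.drop (garbA cs i + 1)).foldl stepB (d, cnt, false, false) := by
  induction n with
  | zero =>
    intro cs i d cnt hb hflag
    have hnil : cs.drop i = [] := List.drop_eq_nil_of_le (by omega)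
    rw [hnil] at hflag
    simp at hflag
  | succ n ih =>
    intro cs i d cnt hb hflag
    by_cases hlt : i < cs.length
    · have hcons := drop_cons_of_lt cs i hlt
      have hget : cs[i]? = some cs[i] := List.getElem?_eq_getElem hlt
      by_cases h1 : cs[i] = '!'
      · have hg1 : gstep (true, false) cs[i] = (true, true) := by simp [gstep, h1]
        have hs1 : stepB (d, cnt, true, false) cs[i] = (d, cnt, true, true) := by simp [stepB, h1]
        have hA : garbA cs i = garbA cs (i + 2) := by
          rw [garbA.eq_def, hget]
          simp [h1]
        by_cases hlt2 : i + 1 < cs.length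
        · have hcons2 := drop_cons_of_lt cs (i + 1) hlt2
          have hg2 : gstep (true, true) cs[i + 1] = (true, false) := by simp [gstep]
          have hs2 : stepB (d, cnt, true, true) cs[i + 1] = (d, cnt, true, false) := by
            simp [stepB]
          rw [hcons, hcons2] at hflag ⊢
          rw [List.foldl_cons, List.foldl_cons, hg1, hg2] at hflag
          rw [hA]
          constructor
          · rw [List.foldl_cons, List.foldl_cons, hg1, hg2]
            exact (ih cs (i + 2) d cnt (by omega) hflag).1
          · rw [List.foldl_cons, List.foldl_cons, hs1, hs2]
            exact (ih cs (i + 2) d cnt (by omega) hflag).2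
        · have hnil2 : cs.drop (i + 1) = [] := List.drop_eq_nil_of_le (by omega)
          rw [hcons, List.foldl_cons, hg1, hnil2] at hflag
          simp at hflag
      · by_cases h2 : cs[i] = '>'
        · have hA : garbA cs i = i := by
            rw [garbA.eq_def, hget]
            simp [h2]
          rw [hA, hcons]
          refine ⟨?_, ?_⟩ <;> simp [List.foldl_cons, gstep, stepB, h2]
        · have hA : garbA cs i = garbA cs (i + 1) := by
            rw [garbA.eq_def, hget]
            simp [h1, h2]
          have hg1 : gstep (true, false) cs[i] = (true, false) := by simp [gstep, h1, h2]
          have hs1 : stepB (d, cnt, true, false) cs[i] = (d, cnt, true, false) := by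
            simp [stepB, h1, h2]
          rw [hcons] at hflag ⊢
          rw [List.foldl_cons, hg1] at hflag
          rw [hA]
          constructor
          · rw [List.foldl_cons, hg1]
            exact (ih cs (i + 1) d cnt (by omega) hflag).1
          · rw [List.foldl_cons, hs1]
            exact (ih cs (i + 1) d cnt (by omega) hflag).2
    · have hnil : cs.drop i = [] := List.drop_eq_nil_of_le (by omega)
      rw [hnil] at hflag
      simp at hflag

theorem mainL (n : ℕ) : ∀ (cs : List Char) (i : Nat) (d cnt : Int),
    cs.length - i ≤ n →
    (cs.drop i).foldl gstep (false, false) = (false, false) →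
    loopA cs i d cnt = ((cs.drop i).foldl stepB (d, cnt, false, false)).2.1 := by
  induction n with
  | zero =>
    intro cs i d cnt hb _
    have hnil : cs.drop i = [] := List.drop_eq_nil_of_le (by omega)
    rw [loopA.eq_def, dif_neg (by omega : ¬ i < cs.length), hnil]
    rfl
  | succ n ih =>
    intro cs i d cnt hb hflag
    by_cases hlt : i < cs.length
    · have hcons := drop_cons_of_lt cs i hlt
      rw [loopA.eq_def, dif_pos hlt]
      by_cases h1 : cs[i] = '<'
      · have hg1 : gstep (false, false) cs[i] = (true, false) := by simp [gstep, h1]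
        have hs1 : stepB (d, cnt, false, false) cs[i] = (d, cnt, true, false) := by
          simp [stepB, h1]
        rw [hcons, List.foldl_cons, hg1] at hflag
        have hflag1 : ((cs.drop (i + 1)).foldl gstep (true, false)).1 = false := by
          rw [hflag]
        obtain ⟨hgeq, hbeq⟩ := garb_fold cs.length cs (i + 1) d cnt (by omega) hflag1
        have hge := garbA_ge cs (i + 1)
        rw [hcons, List.foldl_cons, hs1, hbeq]
        simp only [h1, if_pos]
        exact ih cs (garbA cs (i + 1) + 1) d cnt (by omega) (by rw [← hgeq]; exact hflag)
      · by_cases h2 : cs[i] = '{'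
        · have hg1 : gstep (false, false) cs[i] = (false, false) := by simp [gstep, h2]
          have hs1 : stepB (d, cnt, false, false) cs[i] = (d + 1, cnt + (d + 1), false, false) := by
            simp [stepB, h2]
          rw [hcons, List.foldl_cons, hg1] at hflag
          rw [hcons, List.foldl_cons, hs1]
          simp only [h2, if_pos]
          exact ih cs (i + 1) (d + 1) (cnt + (d + 1)) (by omega) hflag
        · by_cases h3 : cs[i] = '}'
          · have hg1 : gstep (false, false) cs[i] = (false, false) := by simp [gstep, h3]
            have hs1 : stepB (d, cnt, false, false) cs[i] = (d - 1, cnt, false, false) := by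
              simp [stepB, h3]
            rw [hcons, List.foldl_cons, hg1] at hflag
            rw [hcons, List.foldl_cons, hs1]
            simp only [h3, if_pos]
            exact ih cs (i + 1) (d - 1) cnt (by omega) hflag
          · have hg1 : gstep (false, false) cs[i] = (false, false) := by simp [gstep, h1]
            have hs1 : stepB (d, cnt, false, false) cs[i] = (d, cnt, false, false) := by
              simp [stepB, h1, h2, h3]
            rw [hcons, List.foldl_cons, hg1] at hflag
            rw [hcons, List.foldl_cons, hs1]
            simp only [h1, h2, h3]
            exact ih cs (i + 1) d cnt (by omega) hflag
    · have hnil : cs.drop i = [] := List.drop_eq_nil_of_le (by omega)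
      rw [loopA.eq_def, dif_neg hlt, hnil]
      rfl

-- ===== VERDICT (by name: the statement is the Claim_ definition above) =====
theorem part_1_spec : Claim_equal_part_1 := by
  intro text _ hpre
  unfold Spec_part_1 part_1 part_1_alt
  have := mainL text.toList.length text.toList 0 0 0 (by omega) (by simpa using hpre)
  simpa using this
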